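-- pv_equiv track=rewrite | github.com/xyliu-cs/QuanTesting | src/quant_testing.py | build_hotmap
-- ===== SOURCE A (Python) =====
-- def build_hotmap(bmap, qmap, add, miss, src_len):
--     hotmap = {i: 0 for i in range(src_len)}
--     for token in add:
--         for src_index, trg_index in qmap:
--             if trg_index in add[token]:
--                 hotmap[src_index] += 1
--
--     for token in miss:
--         for src_index, trg_index in bmap:
--             if trg_index in miss[token]:
--                 hotmap[src_index] += 1
--     return hotmap
-- ===== SOURCE B (Python) =====
-- def build_hotmap(bmap, qmap, add, miss, src_len):
--     hotmap = dict.fromkeys(range(src_len), 0)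
--
--     # how many `add` tokens contain each target index, once per token
--     qcnt = {}
--     for vals in add.values():
--         for v in set(vals):
--             qcnt[v] = qcnt.get(v, 0) + 1
--     for src_index, trg_index in qmap:
--         c = qcnt.get(trg_index, 0)
--         if c:
--             hotmap[src_index] += c
--
--     # same for `miss` tokens against bmap
--     bcnt = {}
--     for vals in miss.values():
--         for v in set(vals):
--             bcnt[v] = bcnt.get(v, 0) + 1
--     for src_index, trg_index in bmap:
--         c = bcnt.get(trg_index, 0)
--         if c:
--             hotmap[src_index] += c
--     return hotmap
-- ===== Notes on version B (the rewrite author's own statement) =====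
-- stated objective: faster
-- what changed: Replaces A's nested loops (every token's list scanned against every qmap/bmap pair) by first building a per-target-index counter (one increment per token whose list contains the index) and then a single pass over qmap/bmap adding the looked-up count.
import Mathlib
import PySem

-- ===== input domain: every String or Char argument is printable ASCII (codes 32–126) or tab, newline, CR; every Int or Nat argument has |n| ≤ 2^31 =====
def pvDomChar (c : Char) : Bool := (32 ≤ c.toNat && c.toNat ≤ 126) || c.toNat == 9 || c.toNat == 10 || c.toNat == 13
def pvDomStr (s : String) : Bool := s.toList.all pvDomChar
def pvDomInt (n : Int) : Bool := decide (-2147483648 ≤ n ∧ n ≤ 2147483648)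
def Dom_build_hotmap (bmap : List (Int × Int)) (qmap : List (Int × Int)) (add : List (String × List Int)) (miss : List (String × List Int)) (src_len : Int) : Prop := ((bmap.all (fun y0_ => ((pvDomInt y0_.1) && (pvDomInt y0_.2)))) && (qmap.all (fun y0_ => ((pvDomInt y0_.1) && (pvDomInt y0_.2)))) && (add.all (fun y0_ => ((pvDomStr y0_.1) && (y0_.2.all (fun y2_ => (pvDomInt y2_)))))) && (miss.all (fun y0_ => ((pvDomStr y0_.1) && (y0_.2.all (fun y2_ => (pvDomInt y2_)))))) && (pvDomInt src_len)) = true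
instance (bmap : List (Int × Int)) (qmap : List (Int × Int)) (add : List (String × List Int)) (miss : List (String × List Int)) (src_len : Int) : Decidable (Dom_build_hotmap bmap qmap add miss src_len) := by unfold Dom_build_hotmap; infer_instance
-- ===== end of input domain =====

-- B replaces A's nested token×pair scans by a precomputed per-target-index hit counter
-- followed by one pass over each pair list (objective: faster, asymptotically).

-- ===== PORT A =====
-- A, line by line: hotmap = {i: 0 for i in range(src_len)}; two nested loops
-- (`for token in add/miss` iterates the dict's keys) incrementing hotmap[src_index]
-- whenever trg_index is in the token's list. hotmap[s] += 1 is ported as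
-- Dict.modify s 0 (·+1), exact wherever s is already a key (Pre_ guarantees it;
-- on a missing key Python raises KeyError, excluded by Pre_).
def build_hotmap (bmap : List (Int × Int)) (qmap : List (Int × Int)) (add : List (String × List Int)) (miss : List (String × List Int)) (src_len : Int) : List (Int × Int) :=
  let addD := PySem.Dict.ofList add
  let missD := PySem.Dict.ofList miss
  let hotmap0 := (PySem.List.pyRange 0 src_len).foldl (fun d i => d.insert i (0 : Int)) PySem.Dict.empty
  let hotmap1 := addD.keys.foldl (fun h token =>
      qmap.foldl (fun h p =>
        if p.2 ∈ addD.getD token [] then h.modify p.1 0 (· + 1) else h) h) hotmap0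
  let hotmap2 := missD.keys.foldl (fun h token =>
      bmap.foldl (fun h p =>
        if p.2 ∈ missD.getD token [] then h.modify p.1 0 (· + 1) else h) h) hotmap1
  hotmap2.items

-- ===== PORT B =====
-- Source B, line by line: dict.fromkeys(range(src_len), 0); build qcnt/bcnt counters
-- (one increment per token whose list contains v — `set(vals)` is PySem.Set.ofList),
-- then a single pass over qmap/bmap adding the looked-up count when nonzero.
def build_hotmap_alt (bmap : List (Int × Int)) (qmap : List (Int × Int)) (add : List (String × List Int)) (miss : List (String × List Int)) (src_len : Int) : List (Int × Int) :=
  let addD := PySem.Dict.ofList add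
  let missD := PySem.Dict.ofList miss
  let hotmap0 := (PySem.List.pyRange 0 src_len).foldl (fun d i => d.insert i (0 : Int)) PySem.Dict.empty
  let qcnt := addD.values.foldl (fun c vs =>
      (PySem.Set.ofList vs).foldl (fun c v => c.modify v 0 (· + 1)) c) (PySem.Dict.empty : PySem.Dict Int Int)
  let hotmap1 := qmap.foldl (fun h p =>
      let c := qcnt.getD p.2 0
      if c ≠ 0 then h.modify p.1 0 (· + c) else h) hotmap0
  let bcnt := missD.values.foldl (fun c vs =>
      (PySem.Set.ofList vs).foldl (fun c v => c.modify v 0 (· + 1)) c) (PySem.Dict.empty : PySem.Dict Int Int)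
  let hotmap2 := bmap.foldl (fun h p =>
      let c := bcnt.getD p.2 0
      if c ≠ 0 then h.modify p.1 0 (· + c) else h) hotmap1
  hotmap2.items

-- ===== PRECONDITION & SPEC =====
-- Pre_ excludes exactly the inputs on which the Python A raises KeyError: a pair whose
-- target index is contained in some add-token's list (resp. miss-token's) but whose
-- source index is not a key of hotmap, i.e. not in range(src_len).
def Pre_build_hotmap (bmap : List (Int × Int)) (qmap : List (Int × Int)) (add : List (String × List Int)) (miss : List (String × List Int)) (src_len : Int) : Prop :=
  (∀ p ∈ qmap, ((PySem.Dict.ofList add).values.any (fun vs => decide (p.2 ∈ vs))) = true → 0 ≤ p.1 ∧ p.1 < src_len) ∧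
  (∀ p ∈ bmap, ((PySem.Dict.ofList miss).values.any (fun vs => decide (p.2 ∈ vs))) = true → 0 ≤ p.1 ∧ p.1 < src_len)
instance (bmap : List (Int × Int)) (qmap : List (Int × Int)) (add : List (String × List Int)) (miss : List (String × List Int)) (src_len : Int) : Decidable (Pre_build_hotmap bmap qmap add miss src_len) := by unfold Pre_build_hotmap; infer_instance
def pvWitness_build_hotmap : (List (Int × Int)) × (List (Int × Int)) × (List (String × List Int)) × (List (String × List Int)) × Int :=
  ([(0, 5)], [(1, 3)], [("a", [3, 4])], [("b", [5])], 2)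
def Spec_build_hotmap (bmap : List (Int × Int)) (qmap : List (Int × Int)) (add : List (String × List Int)) (miss : List (String × List Int)) (src_len : Int) (out : List (Int × Int)) : Prop := out = build_hotmap_alt bmap qmap add miss src_len
instance (bmap : List (Int × Int)) (qmap : List (Int × Int)) (add : List (String × List Int)) (miss : List (String × List Int)) (src_len : Int) (out : List (Int × Int)) : Decidable (Spec_build_hotmap bmap qmap add miss src_len out) := by unfold Spec_build_hotmap; infer_instance

-- ===== CLAIM (what is proved, stated in full; the proofs are below) =====
def Claim_equal_build_hotmap : Prop := ∀ (bmap : List (Int × Int)) (qmap : List (Int × Int)) (add : List (String × List Int)) (miss : List (String × List Int)) (src_len : Int), Dom_build_hotmap bmap qmap add miss src_len → Pre_build_hotmap bmap qmap add miss src_len → Spec_build_hotmap bmap qmap add miss src_len (build_hotmap bmap qmap add miss src_len)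

-- ===== LEMMAS AND PROOFS =====

-- getD after A's inner scan over pairs: counts the hit pairs landing on s
theorem pvA_inner_getD (l : List (Int × Int)) (vals : List Int) (h : PySem.Dict Int Int) (s : Int) :
    (l.foldl (fun h p => if p.2 ∈ vals then h.modify p.1 0 (· + 1) else h) h).getD s 0
      = h.getD s 0 + (l.countP (fun p => decide (p.2 ∈ vals) && decide (p.1 = s)) : Int) := by
  induction l generalizing h with
  | nil => simp
  | cons p t ih =>
    simp only [List.foldl_cons, List.countP_cons]
    by_cases hv : p.2 ∈ vals
    · rw [if_pos hv, ih]
      by_cases hs : p.1 = s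
      · subst hs; simp [hv]; ring
      · rw [PySem.Dict.getD_modify]
        simp [hs, Ne.symm hs, hv]
    · rw [if_neg hv, ih]; simp [hv]

-- getD after A's outer loop over tokens
theorem pvA_outer_getD (ks : List String) (l : List (Int × Int)) (g : String → List Int)
    (h : PySem.Dict Int Int) (s : Int) :
    (ks.foldl (fun h token =>
        l.foldl (fun h p => if p.2 ∈ g token then h.modify p.1 0 (· + 1) else h) h) h).getD s 0
      = h.getD s 0 + (ks.map (fun k => (l.countP (fun p => decide (p.2 ∈ g k) && decide (p.1 = s)) : Int))).sum := by
  induction ks generalizing h with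
  | nil => simp
  | cons k t ih =>
    simp only [List.foldl_cons, List.map_cons, List.sum_cons]
    rw [ih, pvA_inner_getD]; ring

-- the counter: getD t = number of value-lists containing t
theorem pvB_cnt_getD (vss : List (List Int)) (c : PySem.Dict Int Int) (t : Int) :
    (vss.foldl (fun c vs => (PySem.Set.ofList vs).foldl (fun c v => c.modify v 0 (· + 1)) c) c).getD t 0
      = c.getD t 0 + (vss.countP (fun vs => decide (t ∈ vs)) : Int) := by
  induction vss generalizing c with
  | nil => simp
  | cons vs tl ih =>
    simp only [List.foldl_cons, List.countP_cons]
    rw [ih, PySem.Dict.getD_foldl_modify_add_one]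
    have hcnt : (PySem.Set.ofList vs).count t = if t ∈ vs then 1 else 0 := by
      by_cases hm : t ∈ vs
      · rw [if_pos hm]
        exact List.count_eq_one_of_mem (PySem.Set.nodup_ofList vs)
          ((PySem.Set.mem_ofList vs t).mpr hm)
      · rw [if_neg hm, List.count_eq_zero]
        exact fun hc => hm ((PySem.Set.mem_ofList vs t).mp hc)
    rw [hcnt]
    by_cases hm : t ∈ vs
    · simp [hm]; ring
    · simp [hm]

-- getD after B's single pass over pairs
theorem pvB_pass_getD (l : List (Int × Int)) (cnt : PySem.Dict Int Int)
    (h : PySem.Dict Int Int) (s : Int) :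
    (l.foldl (fun h p => let c := cnt.getD p.2 0; if c ≠ 0 then h.modify p.1 0 (· + c) else h) h).getD s 0
      = h.getD s 0 + (l.map (fun p => if p.1 = s then cnt.getD p.2 0 else 0)).sum := by
  induction l generalizing h with
  | nil => simp
  | cons p t ih =>
    simp only [List.foldl_cons, List.map_cons, List.sum_cons]
    by_cases hc : cnt.getD p.2 0 ≠ 0
    · rw [if_pos hc, ih]
      by_cases hs : p.1 = s
      · subst hs; simp; ring
      · rw [PySem.Dict.getD_modify]; simp [hs, Ne.symm hs]
    · rw [not_not] at hc
      rw [if_neg (by simp [hc]), ih]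
      by_cases hs : p.1 = s <;> simp [hs, hc]

-- Fubini: summing hits token-by-token equals summing counter values pair-by-pair
theorem pvFubini (ks : List String) (l : List (Int × Int)) (Q : String → (Int × Int) → Bool) :
    (ks.map (fun k => (l.countP (Q k) : Int))).sum
      = (l.map (fun p => (ks.countP (fun k => Q k p) : Int))).sum := by
  induction ks with
  | nil => simp
  | cons k t ih =>
    simp only [List.map_cons, List.sum_cons]
    rw [ih, ← PySem.List.sum_map_ite_one_zero (Q k) l, ← PySem.List.sum_map_add_int]
    apply congrArg List.sum
    apply List.map_congr_left
    intro p _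
    simp only [List.countP_cons]
    by_cases hq : Q k p
    · simp [hq]; omega
    · simp [hq]

-- keys are preserved by A's inner scan when every hit source index is already a key
theorem pvA_inner_keys (l : List (Int × Int)) (vals : List Int) (h : PySem.Dict Int Int)
    (hk : ∀ p ∈ l, p.2 ∈ vals → p.1 ∈ h.keys) :
    (l.foldl (fun h p => if p.2 ∈ vals then h.modify p.1 0 (· + 1) else h) h).keys = h.keys := by
  induction l generalizing h with
  | nil => rfl
  | cons p t ih =>
    simp only [List.foldl_cons]
    by_cases hv : p.2 ∈ vals
    · rw [if_pos hv]
      have hmem : p.1 ∈ h.keys := hk p (List.mem_cons_self) hv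
      have hkeys : (h.modify p.1 0 (· + 1)).keys = h.keys := by
        rw [PySem.Dict.keys_modify, PySem.Dict.keys_insert_of_contains]
        exact (PySem.Dict.contains_iff_mem_keys h p.1).mpr hmem
      rw [ih _ (fun q hq hqv => by rw [hkeys]; exact hk q (List.mem_cons_of_mem _ hq) hqv), hkeys]
    · rw [if_neg hv]
      exact ih _ (fun q hq hqv => hk q (List.mem_cons_of_mem _ hq) hqv)

theorem pvA_outer_keys (ks : List String) (l : List (Int × Int)) (g : String → List Int)
    (h : PySem.Dict Int Int) (hk : ∀ p ∈ l, (∃ k ∈ ks, p.2 ∈ g k) → p.1 ∈ h.keys) :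
    (ks.foldl (fun h token =>
        l.foldl (fun h p => if p.2 ∈ g token then h.modify p.1 0 (· + 1) else h) h) h).keys = h.keys := by
  induction ks generalizing h with
  | nil => rfl
  | cons k t ih =>
    simp only [List.foldl_cons]
    have h1 : (l.foldl (fun h p => if p.2 ∈ g k then h.modify p.1 0 (· + 1) else h) h).keys = h.keys :=
      pvA_inner_keys l (g k) h (fun p hp hv => hk p hp ⟨k, List.mem_cons_self, hv⟩)
    rw [ih _ (fun p hp ⟨k', hk', hv⟩ => by
        rw [h1]; exact hk p hp ⟨k', List.mem_cons_of_mem _ hk', hv⟩), h1]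

theorem pvB_pass_keys (l : List (Int × Int)) (cnt : PySem.Dict Int Int) (h : PySem.Dict Int Int)
    (hk : ∀ p ∈ l, cnt.getD p.2 0 ≠ 0 → p.1 ∈ h.keys) :
    (l.foldl (fun h p => let c := cnt.getD p.2 0; if c ≠ 0 then h.modify p.1 0 (· + c) else h) h).keys = h.keys := by
  induction l generalizing h with
  | nil => rfl
  | cons p t ih =>
    simp only [List.foldl_cons]
    by_cases hc : cnt.getD p.2 0 ≠ 0
    · rw [if_pos hc]
      have hmem : p.1 ∈ h.keys := hk p (List.mem_cons_self) hc
      have hkeys : (h.modify p.1 0 (· + cnt.getD p.2 0)).keys = h.keys := by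
        rw [PySem.Dict.keys_modify, PySem.Dict.keys_insert_of_contains]
        exact (PySem.Dict.contains_iff_mem_keys h p.1).mpr hmem
      rw [ih _ (fun q hq hqc => by rw [hkeys]; exact hk q (List.mem_cons_of_mem _ hq) hqc), hkeys]
    · rw [if_neg hc]
      exact ih _ (fun q hq hqc => hk q (List.mem_cons_of_mem _ hq) hqc)

-- the initial hotmap: items, keys, lookups
theorem pvInit_items (n : Int) :
    ((PySem.List.pyRange 0 n).foldl (fun d i => d.insert i (0 : Int)) PySem.Dict.empty).items
      = (PySem.List.pyRange 0 n).map (fun i => (i, (0 : Int))) := by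
  have h := PySem.Dict.items_foldl_insert_fresh (PySem.List.pyRange 0 n) (fun i => i)
      (fun _ => (0 : Int)) PySem.Dict.empty (fun a _ => by simp)
      (by simpa using PySem.List.nodup_pyRange_one 0 n)
  simpa using h

theorem pvInit_keys (n : Int) :
    ((PySem.List.pyRange 0 n).foldl (fun d i => d.insert i (0 : Int)) PySem.Dict.empty).keys
      = PySem.List.pyRange 0 n := by
  show (((PySem.List.pyRange 0 n).foldl (fun d i => d.insert i (0 : Int)) PySem.Dict.empty).items.map (·.1)) = _
  rw [pvInit_items, List.map_map]
  simp [Function.comp_def]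

-- one whole phase of A equals the corresponding phase of B, as dicts
theorem pvPhase_eq (dD : PySem.Dict String (List Int)) (l : List (Int × Int))
    (h : PySem.Dict Int Int) (hnodup : dD.keys.Nodup) (hhk : h.keys.Nodup)
    (hk : ∀ p ∈ l, (dD.values.any (fun vs => decide (p.2 ∈ vs))) = true → p.1 ∈ h.keys) :
    dD.keys.foldl (fun h token =>
        l.foldl (fun h p => if p.2 ∈ dD.getD token [] then h.modify p.1 0 (· + 1) else h) h) h
      = (let cnt := dD.values.foldl (fun c vs =>
            (PySem.Set.ofList vs).foldl (fun c v => c.modify v 0 (· + 1)) c) (PySem.Dict.empty : PySem.Dict Int Int)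
         l.foldl (fun h p => let c := cnt.getD p.2 0; if c ≠ 0 then h.modify p.1 0 (· + c) else h) h) := by
  simp only []
  set cnt := dD.values.foldl (fun c vs =>
      (PySem.Set.ofList vs).foldl (fun c v => c.modify v 0 (· + 1)) c) (PySem.Dict.empty : PySem.Dict Int Int) with hcnt
  have hcntD : ∀ t, cnt.getD t 0 = (dD.values.countP (fun vs => decide (t ∈ vs)) : Int) := by
    intro t; rw [hcnt, pvB_cnt_getD]; simp
  -- the membership hypotheses in the two phases coincide
  have hmemiff : ∀ t : Int, (dD.values.any (fun vs => decide (t ∈ vs))) = true ↔ (∃ k ∈ dD.keys, t ∈ dD.getD k []) := by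
    intro t
    rw [PySem.Dict.values_eq_map_keys dD hnodup []]
    simp [List.any_eq_true]
  have hkA : ∀ p ∈ l, (∃ k ∈ dD.keys, p.2 ∈ dD.getD k []) → p.1 ∈ h.keys :=
    fun p hp he => hk p hp ((hmemiff p.2).mpr he)
  have hkB : ∀ p ∈ l, cnt.getD p.2 0 ≠ 0 → p.1 ∈ h.keys := by
    intro p hp hc
    apply hk p hp
    rw [hcntD] at hc
    have hne : dD.values.countP (fun vs => decide (p.2 ∈ vs)) ≠ 0 := fun h0 => hc (by rw [h0]; rfl)
    rcases List.countP_pos_iff.mp (Nat.pos_of_ne_zero hne) with ⟨vs, hvs, hmem⟩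
    exact List.any_eq_true.mpr ⟨vs, hvs, hmem⟩
  have hkeysA := pvA_outer_keys dD.keys l (fun k => dD.getD k []) h hkA
  have hkeysB := pvB_pass_keys l cnt h hkB
  apply PySem.Dict.ext
  rw [PySem.Dict.items_eq_map_keys _ (by rw [hkeysA]; exact hhk) 0,
      PySem.Dict.items_eq_map_keys _ (by rw [hkeysB]; exact hhk) 0,
      hkeysA, hkeysB]
  apply List.map_congr_left
  intro s _
  rw [pvA_outer_getD, pvB_pass_getD]
  congr 1
  rw [pvFubini dD.keys l (fun k p => decide (p.2 ∈ dD.getD k []) && decide (p.1 = s))]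
  congr 1
  apply congrArg List.sum
  apply List.map_congr_left
  intro p _
  by_cases hs : p.1 = s
  · rw [if_pos hs, hcntD, PySem.Dict.values_eq_map_keys dD hnodup []]
    rw [List.countP_map]
    congr 1
    apply List.countP_congr
    intro k _; simp [hs, Function.comp]
  · rw [if_neg hs]
    simp only [hs]
    simp

-- ===== VERDICT (by name: the statement is the Claim_ definition above) =====
theorem build_hotmap_spec : Claim_equal_build_hotmap := by
  intro bmap qmap add miss src_len _ hpre
  obtain ⟨hq, hb⟩ := hpre
  show build_hotmap bmap qmap add miss src_len = build_hotmap_alt bmap qmap add miss src_len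
  unfold build_hotmap build_hotmap_alt
  simp only []
  set hot0 := (PySem.List.pyRange 0 src_len).foldl (fun d i => d.insert i (0 : Int)) PySem.Dict.empty with hhot0
  have hkeys0 : hot0.keys = PySem.List.pyRange 0 src_len := pvInit_keys src_len
  have hnod0 : hot0.keys.Nodup := by rw [hkeys0]; exact PySem.List.nodup_pyRange_one 0 src_len
  have hk1 : ∀ p ∈ qmap, ((PySem.Dict.ofList add).values.any (fun vs => decide (p.2 ∈ vs))) = true → p.1 ∈ hot0.keys := by
    intro p hp hv
    rw [hkeys0, PySem.List.mem_pyRange_one]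
    exact hq p hp hv
  have h1 := pvPhase_eq (PySem.Dict.ofList add) qmap hot0 (PySem.Dict.nodup_keys_ofList add) hnod0 hk1
  simp only [] at h1
  rw [h1]
  set hot1 := qmap.foldl (fun h p =>
      let c := ((PySem.Dict.ofList add).values.foldl (fun c vs =>
        (PySem.Set.ofList vs).foldl (fun c v => c.modify v 0 (· + 1)) c) (PySem.Dict.empty : PySem.Dict Int Int)).getD p.2 0
      if c ≠ 0 then h.modify p.1 0 (· + c) else h) hot0 with hhot1
  have hkeys1 : hot1.keys = hot0.keys := by
    rw [hhot1]
    exact pvB_pass_keys qmap _ hot0 (by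
      intro p hp hc
      apply hk1 p hp
      rw [pvB_cnt_getD] at hc
      simp only [PySem.Dict.getD_empty] at hc
      have hne : (PySem.Dict.ofList add).values.countP (fun vs => decide (p.2 ∈ vs)) ≠ 0 := fun h0 => hc (by rw [h0]; rfl)
      rcases List.countP_pos_iff.mp (Nat.pos_of_ne_zero hne) with ⟨vs, hvs, hmem⟩
      exact List.any_eq_true.mpr ⟨vs, hvs, hmem⟩)
  have hk2 : ∀ p ∈ bmap, ((PySem.Dict.ofList miss).values.any (fun vs => decide (p.2 ∈ vs))) = true → p.1 ∈ hot1.keys := by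
    intro p hp hv
    rw [hkeys1, hkeys0, PySem.List.mem_pyRange_one]
    exact hb p hp hv
  have h2 := pvPhase_eq (PySem.Dict.ofList miss) bmap hot1 (PySem.Dict.nodup_keys_ofList miss)
      (by rw [hkeys1]; exact hnod0) hk2
  simp only [] at h2
  rw [h2]
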